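-- pv_equiv track=rewrite | github.com/lcrees/knife | chainsaw/_reduce.py | _weave
-- ===== SOURCE A (Python) =====
-- from functools import partial, reduce
-- from itertools import cycle, islice, tee, starmap
--
-- def _weave(b, i=iter, n=next, s=islice, c=cycle, p=partial, t=tee, l=list):
--     work, measure = t(b)
--     nexts = c(p(n, i(item)) for item in work)
--     pending = len(l(measure))
--     while pending:
--         try:
--             for nextz in nexts:
--                 yield nextz()
--         except StopIteration:
--             pending -= 1
--             nexts = c(s(nexts, pending))
-- ===== SOURCE B (Python) =====
-- from functools import partial, reduce
-- from itertools import cycle, islice, tee, starmap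
--
-- def _weave(b, i=iter, n=next, s=islice, c=cycle, p=partial, t=tee, l=list):
--     rows = [l(x) for x in b]
--     for k in range(max(map(len, rows), default=0)):
--         for row in rows:
--             if k < len(row):
--                 yield row[k]
-- ===== Notes on version B (the rewrite author's own statement) =====
-- stated objective: idiomatic
-- what changed: Replaces A's cycle/islice/tee iterator-shrinking machinery with a plain index-based column traversal: materialise the rows, then for each column index k yield row[k] from every row long enough.
import Mathlib
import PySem

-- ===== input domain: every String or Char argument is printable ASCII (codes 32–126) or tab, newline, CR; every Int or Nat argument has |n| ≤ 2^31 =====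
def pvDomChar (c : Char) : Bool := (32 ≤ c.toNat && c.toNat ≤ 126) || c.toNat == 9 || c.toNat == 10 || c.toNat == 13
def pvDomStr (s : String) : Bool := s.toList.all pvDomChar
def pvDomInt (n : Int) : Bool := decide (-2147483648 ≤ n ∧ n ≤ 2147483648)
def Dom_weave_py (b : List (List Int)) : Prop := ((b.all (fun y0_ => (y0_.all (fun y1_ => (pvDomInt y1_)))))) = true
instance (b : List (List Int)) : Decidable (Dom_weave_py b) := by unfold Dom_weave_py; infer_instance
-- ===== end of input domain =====

-- B replaces A's cycle/islice iterator machinery with a column-by-column index traversal over materialised rows (alternative decomposition, same output order).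


-- ===== PORT A =====
-- A keeps a cycle of per-iterable `next` thunks; on StopIteration it drops the
-- exhausted iterator (islice of the remaining `pending` thunks) and re-cycles.
-- Modelled as a queue of the iterators' remaining elements: pop the front,
-- yield its head and rotate its tail to the back, or drop it when exhausted.
def weaveAQueue (queue : List (List Int)) : List Int :=
  match queue with
  | [] => []
  | [] :: rest => weaveAQueue rest
  | (x :: xs) :: rest => x :: weaveAQueue (rest ++ [xs])
termination_by (queue.map (fun r => r.length + 1)).sum
decreasing_by
  all_goals simp
  omega

def weave_py (b : List (List Int)) : List Int := weaveAQueue b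

-- ===== PORT B =====
-- B: for k in range(max row length): for row in rows: if k < len(row): yield row[k]
def weave_py_alt (b : List (List Int)) : List Int :=
  let m := (b.map List.length).foldl max 0
  (List.range m).flatMap (fun k => b.filterMap (fun row => row[k]?))

-- ===== PRECONDITION & SPEC =====
def Spec_weave_py (b : List (List Int)) (out : List Int) : Prop := out = weave_py_alt b
instance (b : List (List Int)) (out : List Int) : Decidable (Spec_weave_py b out) := by unfold Spec_weave_py; infer_instance

-- ===== CLAIM (what is proved, stated in full; the proofs are below) =====
def Claim_equal_weave_py : Prop := ∀ (b : List (List Int)), Dom_weave_py b → Spec_weave_py b (weave_py b)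

-- ===== LEMMAS AND PROOFS =====

-- tail of a nonempty row, dropping empty rows
def pvTails (b : List (List Int)) : List (List Int) :=
  b.filterMap (fun r => match r with | [] => none | _ :: xs => some xs)

def pvMaxLen (b : List (List Int)) : Nat := (b.map List.length).foldl max 0

theorem foldl_max_init (a : Nat) (l : List Nat) :
    l.foldl max a = max a (l.foldl max 0) := by
  induction l generalizing a with
  | nil => simp
  | cons x xs ih =>
    simp only [List.foldl_cons]
    rw [ih (max a x), ih (max 0 x)]
    omega

theorem pvMaxLen_cons (r : List Int) (b : List (List Int)) :
    pvMaxLen (r :: b) = max r.length (pvMaxLen b) := by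
  unfold pvMaxLen
  rw [List.map_cons, List.foldl_cons, foldl_max_init]
  simp

theorem pvMaxLen_tails (b : List (List Int)) :
    pvMaxLen (pvTails b) = pvMaxLen b - 1 := by
  induction b with
  | nil => simp [pvTails, pvMaxLen]
  | cons r rest ih =>
    cases r with
    | nil =>
      have ht : pvTails (([] : List Int) :: rest) = pvTails rest := by
        simp [pvTails]
      rw [ht, ih, pvMaxLen_cons]
      simp
    | cons x xs =>
      have ht : pvTails ((x :: xs) :: rest) = xs :: pvTails rest := by
        simp [pvTails]
      rw [ht, pvMaxLen_cons, pvMaxLen_cons, ih]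
      simp only [List.length_cons]
      omega

theorem pvMaxLen_zero_all_nil (b : List (List Int)) (h : pvMaxLen b = 0) :
    ∀ r ∈ b, r = [] := by
  induction b with
  | nil => simp
  | cons r rest ih =>
    rw [pvMaxLen_cons] at h
    intro s hs
    rcases List.mem_cons.mp hs with rfl | hs
    · exact List.eq_nil_of_length_eq_zero (by omega)
    · exact ih (by omega) s hs

-- one full round of A's queue: heads first, then the rotated tails
theorem weaveAQueue_round (ls acc : List (List Int)) :
    weaveAQueue (ls ++ acc) =
      ls.filterMap List.head? ++ weaveAQueue (acc ++ pvTails ls) := by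
  induction ls generalizing acc with
  | nil => simp [pvTails]
  | cons r rest ih =>
    cases r with
    | nil =>
      simp only [List.cons_append, weaveAQueue]
      rw [ih acc]
      simp [pvTails]
    | cons x xs =>
      simp only [List.cons_append, weaveAQueue]
      rw [List.append_assoc, ih (acc ++ [xs])]
      have ht : pvTails ((x :: xs) :: rest) = xs :: pvTails rest := by
        simp [pvTails]
      simp [ht]

theorem col_zero (b : List (List Int)) :
    b.filterMap (fun row => row[0]?) = b.filterMap List.head? := by
  induction b with
  | nil => rfl
  | cons r rest ih => cases r <;> simp_all

theorem col_succ (b : List (List Int)) (k : Nat) :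
    b.filterMap (fun row => row[k + 1]?) =
      (pvTails b).filterMap (fun row => row[k]?) := by
  induction b with
  | nil => rfl
  | cons r rest ih =>
    cases r with
    | nil => simpa [pvTails] using ih
    | cons x xs =>
      have ht : pvTails ((x :: xs) :: rest) = xs :: pvTails rest := by
        simp [pvTails]
      simp only [ht, List.filterMap_cons, List.getElem?_cons_succ, ih]

theorem alt_unfold (b : List (List Int)) :
    weave_py_alt b =
      (List.range (pvMaxLen b)).flatMap (fun k => b.filterMap (fun row => row[k]?)) := rfl

theorem alt_step (b : List (List Int)) (m : Nat) (hm : pvMaxLen b = m + 1) :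
    weave_py_alt b = b.filterMap List.head? ++ weave_py_alt (pvTails b) := by
  rw [alt_unfold, alt_unfold, pvMaxLen_tails, hm]
  simp only [Nat.add_sub_cancel]
  rw [List.range_succ_eq_map]
  simp only [List.flatMap_cons, List.flatMap_map]
  congr 1
  · exact col_zero b
  · exact List.flatMap_congr (fun k _ => col_succ b k)

theorem weaveAQueue_eq_alt (b : List (List Int)) :
    weaveAQueue b = weave_py_alt b := by
  generalize hm : pvMaxLen b = m
  induction m generalizing b with
  | zero =>
    have hall := pvMaxLen_zero_all_nil b hm
    have hb : weaveAQueue b = [] := by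
      have h1 : b.filterMap List.head? = [] := by
        rw [List.filterMap_eq_nil_iff]
        intro r hr; rw [hall r hr]; rfl
      have h2 : pvTails b = [] := by
        rw [pvTails, List.filterMap_eq_nil_iff]
        intro r hr; rw [hall r hr]
      have hr := weaveAQueue_round b []
      rw [h1, h2] at hr
      simpa [weaveAQueue] using hr
    rw [hb, alt_unfold, hm]
    simp
  | succ m ih =>
    have hround := weaveAQueue_round b []
    simp only [List.append_nil, List.nil_append] at hround
    have htails : pvMaxLen (pvTails b) = m := by
      simp [pvMaxLen_tails, hm]
    rw [hround, ih (pvTails b) htails, alt_step b m hm]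

-- ===== VERDICT (by name: the statement is the Claim_ definition above) =====
theorem weave_py_spec : Claim_equal_weave_py := by
  intro b _
  unfold Spec_weave_py weave_py
  exact weaveAQueue_eq_alt b
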